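-- pv_equiv track=rewrite | github.com/BraunMichael/InstanceSegmentation-Detectron2_CustomDataLoader | Utility/CropScaleSave.py | longestContinuousLengthPerLine
-- ===== SOURCE A (Python) =====
-- def longestContinuousLengthPerLine(whitePixelsDict):
--     longestContinuousLengthPerLineDict = {}
--
--     # key is line number, value is list of tuples of (line start pixel, line end pixel)
--     longLinesPerLineDict = {}
--
--     for line in whitePixelsDict:
--         longestContinuousLengthPerLineDict[line] = 1
--         continuousLength = 1
--
--         pixel = 0
--
--         while pixel < (len(whitePixelsDict[line])-1):
--             pixelPositionDifference = whitePixelsDict[line][pixel+1]-whitePixelsDict[line][pixel]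
--             if pixelPositionDifference == 1:
--                 continuousLength += 1
--             else:
--                 if continuousLength > 100:
--                     if line not in longLinesPerLineDict:
--                         longLinesPerLineDict[line] = []
--                     longLinesPerLineDict[line].append((whitePixelsDict[line][pixel]-continuousLength+1, whitePixelsDict[line][pixel]))
--                 if continuousLength > longestContinuousLengthPerLineDict[line]:
--                     longestContinuousLengthPerLineDict[line] = continuousLength
--                 continuousLength = 1
--
--             # check if we are on penultimate pixel, ie next pixel is last one and will kill while loop
--             if (pixel+1) == (len(whitePixelsDict[line])-1):
--                 # Even if line is continuous, there is no next loop, need to add to dicts now!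
--                 if pixelPositionDifference == 1:
--                     if continuousLength > 100:
--                         if line not in longLinesPerLineDict:
--                             longLinesPerLineDict[line] = []
--                         longLinesPerLineDict[line].append((whitePixelsDict[line][pixel+1]-continuousLength+1, whitePixelsDict[line][pixel+1]))
--                     if continuousLength > longestContinuousLengthPerLineDict[line]:
--                         longestContinuousLengthPerLineDict[line] = continuousLength
--                     continuousLength = 1
--
--             pixel += 1
--     return longestContinuousLengthPerLineDict, longLinesPerLineDict
-- ===== SOURCE B (Python) =====
-- def longestContinuousLengthPerLine(whitePixelsDict):
--     longestContinuousLengthPerLineDict = {}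
--     longLinesPerLineDict = {}
--     for line, pixels in whitePixelsDict.items():
--         # build the maximal consecutive runs of the line as (endValue, length) pairs
--         runs = []
--         i = 0
--         n = len(pixels)
--         while i < n:
--             j = i
--             while j + 1 < n and pixels[j + 1] - pixels[j] == 1:
--                 j += 1
--             runs.append((pixels[j], j - i + 1))
--             i = j + 1
--         longestContinuousLengthPerLineDict[line] = max([1] + [length for _, length in runs])
--         longRuns = [(end - length + 1, end) for end, length in runs if length > 100]
--         if longRuns:
--             longLinesPerLineDict[line] = longRuns
--     return longestContinuousLengthPerLineDict, longLinesPerLineDict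
-- ===== Notes on version B (the rewrite author's own statement) =====
-- stated objective: simpler
-- what changed: B first decomposes each line into its maximal consecutive runs (end,length) and then takes max/filter over that run list, replacing A's single inline scan with its penultimate-pixel special case; Pre_ only excludes association lists with duplicate line keys, which cannot arise from A's Python dict argument and whose first-match lookup order is accidental.
import Mathlib
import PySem

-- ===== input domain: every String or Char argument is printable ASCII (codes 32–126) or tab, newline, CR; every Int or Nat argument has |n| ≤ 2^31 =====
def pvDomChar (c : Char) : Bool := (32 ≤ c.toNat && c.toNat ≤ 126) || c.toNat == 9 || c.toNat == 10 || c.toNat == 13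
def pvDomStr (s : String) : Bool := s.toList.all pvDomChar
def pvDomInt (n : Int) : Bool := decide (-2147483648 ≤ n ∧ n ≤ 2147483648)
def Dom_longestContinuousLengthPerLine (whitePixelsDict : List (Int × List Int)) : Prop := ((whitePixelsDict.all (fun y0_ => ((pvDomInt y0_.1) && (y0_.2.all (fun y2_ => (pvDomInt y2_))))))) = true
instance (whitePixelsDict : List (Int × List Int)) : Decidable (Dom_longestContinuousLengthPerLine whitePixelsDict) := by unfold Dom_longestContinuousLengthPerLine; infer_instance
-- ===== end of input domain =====

-- B replaces A's inline scan (with its penultimate-pixel special case) by a build-runs-then-max/filter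
-- decomposition; objective: simpler. Equivalence of return values on association lists with distinct keys.


-- ===== PORT A =====
-- list indexing; every index used by either port is provably in range, so getD is exact
def pvGetI (xs : List Int) (i : Nat) : Int := xs.getD i 0

-- whitePixelsDict[line]: first-match lookup in the association list (key always present when called)
def pvLookup (d : List (Int × List Int)) (k : Int) : List Int :=
  ((d.find? (fun q => q.1 == k)).map Prod.snd).getD []

-- one iteration of A's while body: state (continuousLength, dict entry for the line, long-run list);
-- the second 'if' is the penultimate-pixel special case (its inner 'if diff == 1' folded into the guard)
def aStep (pixels : List Int) (pixel : Nat) (cl best : Int) (longs : List (Int × Int)) :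
    Int × Int × List (Int × Int) :=
  let d := pvGetI pixels (pixel + 1) - pvGetI pixels pixel
  let s1 : Int × Int × List (Int × Int) :=
    if d = 1 then (cl + 1, best, longs)
    else
      ((1 : Int),
       (if cl > best then cl else best),
       (if cl > 100 then longs ++ [(pvGetI pixels pixel - cl + 1, pvGetI pixels pixel)] else longs))
  if pixel + 1 = pixels.length - 1 ∧ d = 1 then
    ((1 : Int),
     (if s1.1 > s1.2.1 then s1.1 else s1.2.1),
     (if s1.1 > 100 then
        s1.2.2 ++ [(pvGetI pixels (pixel + 1) - s1.1 + 1, pvGetI pixels (pixel + 1))]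
      else s1.2.2))
  else s1

-- A's while loop; fuel = pixels.length always suffices (the loop runs at most length - 1 times)
def aLoop (pixels : List Int) : Nat → Nat → Int → Int → List (Int × Int) → Int × List (Int × Int)
  | 0, _, _, best, longs => (best, longs)
  | fuel + 1, pixel, cl, best, longs =>
    if pixel < pixels.length - 1 then
      let s := aStep pixels pixel cl best longs
      aLoop pixels fuel (pixel + 1) s.1 s.2.1 s.2.2
    else (best, longs)

-- with distinct keys (Pre_) each dict assignment to a fresh key is an append in insertion order
def longestContinuousLengthPerLine (whitePixelsDict : List (Int × List Int)) :
    (List (Int × Int)) × (List (Int × List (Int × Int))) :=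
  whitePixelsDict.foldl
    (fun acc p =>
      let pixels := pvLookup whitePixelsDict p.1
      let r := aLoop pixels pixels.length 0 1 1 []
      (acc.1 ++ [(p.1, r.1)], if r.2 = [] then acc.2 else acc.2 ++ [(p.1, r.2)]))
    ([], [])

-- ===== PORT B =====
-- inner while of B: extend the run starting at j while the next pixel is consecutive
-- (fuel = pixels.length always suffices)
def bRunEnd (pixels : List Int) : Nat → Nat → Nat
  | 0, j => j
  | fuel + 1, j =>
    if j + 1 < pixels.length ∧ pvGetI pixels (j + 1) - pvGetI pixels j = 1 then
      bRunEnd pixels fuel (j + 1)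
    else j

-- outer while of B: the list of maximal consecutive runs from index i, as (endValue, length) pairs
def bRuns (pixels : List Int) : Nat → Nat → List (Int × Int)
  | 0, _ => []
  | fuel + 1, i =>
    if i < pixels.length then
      (pvGetI pixels (bRunEnd pixels pixels.length i),
        ((bRunEnd pixels pixels.length i - i + 1 : Nat) : Int)) ::
        bRuns pixels fuel (bRunEnd pixels pixels.length i + 1)
    else []

def longestContinuousLengthPerLine_alt (whitePixelsDict : List (Int × List Int)) :
    (List (Int × Int)) × (List (Int × List (Int × Int))) :=
  whitePixelsDict.foldl
    (fun acc p =>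
      let runs := bRuns p.2 p.2.length 0
      let longest := (runs.map Prod.snd).foldl max 1       -- max([1] + lengths)
      let longRuns := (runs.filter (fun r => r.2 > 100)).map (fun r => (r.1 - r.2 + 1, r.1))
      (acc.1 ++ [(p.1, longest)],
       if longRuns = [] then acc.2 else acc.2 ++ [(p.1, longRuns)]))
    ([], [])

-- ===== PRECONDITION & SPEC =====
-- Pre_ excludes association lists with duplicate line keys: A's Python argument is a dict, which cannot
-- hold duplicate keys, and on such lists the first-match-lookup behaviour of the port is accidental.
def Pre_longestContinuousLengthPerLine (whitePixelsDict : List (Int × List Int)) : Prop :=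
  (whitePixelsDict.map Prod.fst).Nodup
instance (whitePixelsDict : List (Int × List Int)) : Decidable (Pre_longestContinuousLengthPerLine whitePixelsDict) := by unfold Pre_longestContinuousLengthPerLine; infer_instance

def pvWitness_longestContinuousLengthPerLine : (List (Int × List Int)) :=
  [(0, [3, 4, 5, 9]), (2, []), (-1, [7])]

def Spec_longestContinuousLengthPerLine (whitePixelsDict : List (Int × List Int)) (out : (List (Int × Int)) × (List (Int × List (Int × Int)))) : Prop := out = longestContinuousLengthPerLine_alt whitePixelsDict
instance (whitePixelsDict : List (Int × List Int)) (out : (List (Int × Int)) × (List (Int × List (Int × Int)))) : Decidable (Spec_longestContinuousLengthPerLine whitePixelsDict out) := by unfold Spec_longestContinuousLengthPerLine; infer_instance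

-- ===== CLAIM (what is proved, stated in full; the proofs are below) =====
def Claim_equal_longestContinuousLengthPerLine : Prop := ∀ (whitePixelsDict : List (Int × List Int)), Dom_longestContinuousLengthPerLine whitePixelsDict → Pre_longestContinuousLengthPerLine whitePixelsDict → Spec_longestContinuousLengthPerLine whitePixelsDict (longestContinuousLengthPerLine whitePixelsDict)

-- ===== LEMMAS AND PROOFS =====

theorem pvLookup_eq (d : List (Int × List Int)) (p : Int × List Int)
    (hnd : (d.map Prod.fst).Nodup) (hp : p ∈ d) : pvLookup d p.1 = p.2 := by
  induction d with
  | nil => cases hp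
  | cons q t ih =>
    simp only [List.map_cons, List.nodup_cons] at hnd
    rcases List.mem_cons.mp hp with h | h
    · subst h; simp [pvLookup]
    · have hne : ¬ (q.1 == p.1) = true := by
        intro he
        have hmem : p.1 ∈ List.map Prod.fst t := List.mem_map_of_mem h
        exact hnd.1 (beq_iff_eq.mp he ▸ hmem)
      have := ih hnd.2 h
      simpa [pvLookup, List.find?_cons, hne] using this

theorem bRunEnd_ge (pixels : List Int) :
    ∀ fuel j, j ≤ bRunEnd pixels fuel j := by
  intro fuel
  induction fuel with
  | zero => intro j; simp [bRunEnd]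
  | succ fuel ih =>
    intro j
    simp only [bRunEnd]
    split
    · exact le_trans (by omega) (ih (j + 1))
    · omega

theorem bRunEnd_fuel (pixels : List Int) :
    ∀ f1 f2 j, pixels.length - 1 - j ≤ f1 → pixels.length - 1 - j ≤ f2 →
      bRunEnd pixels f1 j = bRunEnd pixels f2 j := by
  intro f1
  induction f1 with
  | zero =>
    intro f2 j h1 h2
    cases f2 with
    | zero => rfl
    | succ f2 => simp only [bRunEnd]; rw [if_neg (fun hc => absurd hc.1 (by omega))]
  | succ f1 ih =>
    intro f2 j h1 h2
    cases f2 with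
    | zero => simp only [bRunEnd]; rw [if_neg (fun hc => absurd hc.1 (by omega))]
    | succ f2 =>
      simp only [bRunEnd]
      split
      · next hc => exact ih f2 (j + 1) (by omega) (by omega)
      · rfl

theorem bRunEnd_stop (pixels : List Int) (fuel j : Nat)
    (h : ¬ (j + 1 < pixels.length ∧ pvGetI pixels (j + 1) - pvGetI pixels j = 1)) :
    bRunEnd pixels fuel j = j := by
  cases fuel with
  | zero => rfl
  | succ fuel => simp only [bRunEnd]; rw [if_neg h]

theorem bRunEnd_cont (pixels : List Int) (fuel j : Nat)
    (h : j + 1 < pixels.length ∧ pvGetI pixels (j + 1) - pvGetI pixels j = 1)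
    (hf : pixels.length - 1 - j ≤ fuel) :
    bRunEnd pixels fuel j = bRunEnd pixels fuel (j + 1) := by
  cases fuel with
  | zero => omega
  | succ fuel =>
    simp only [bRunEnd]
    rw [if_pos h]
    exact bRunEnd_fuel pixels fuel (fuel + 1) (j + 1) (by omega) (by omega)

theorem bRunEnd_lt (pixels : List Int) :
    ∀ fuel j, j < pixels.length → bRunEnd pixels fuel j < pixels.length := by
  intro fuel
  induction fuel with
  | zero => intro j hj; simpa [bRunEnd] using hj
  | succ fuel ih =>
    intro j hj
    simp only [bRunEnd]
    split
    · next hc => exact ih (j + 1) hc.1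
    · exact hj

theorem bRuns_exit (pixels : List Int) (fuel i : Nat) (h : ¬ i < pixels.length) :
    bRuns pixels fuel i = [] := by
  cases fuel with
  | zero => rfl
  | succ fuel => simp only [bRuns]; rw [if_neg h]

theorem aLoop_exit (pixels : List Int) (fuel i : Nat) (cl best : Int) (longs : List (Int × Int))
    (h : ¬ i < pixels.length - 1) :
    aLoop pixels fuel i cl best longs = (best, longs) := by
  cases fuel with
  | zero => rfl
  | succ fuel => simp only [aLoop]; rw [if_neg h]

theorem aLoop_fuel (pixels : List Int) :
    ∀ f1 f2 i (cl best : Int) (longs : List (Int × Int)),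
      pixels.length - 1 - i ≤ f1 → pixels.length - 1 - i ≤ f2 →
      aLoop pixels f1 i cl best longs = aLoop pixels f2 i cl best longs := by
  intro f1
  induction f1 with
  | zero =>
    intro f2 i cl best longs h1 h2
    rw [aLoop_exit pixels f2 i cl best longs (by omega)]
    rfl
  | succ f1 ih =>
    intro f2 i cl best longs h1 h2
    by_cases hi : i < pixels.length - 1
    · cases f2 with
      | zero => omega
      | succ f2 =>
        simp only [aLoop]
        rw [if_pos hi, if_pos hi]
        exact ih f2 (i + 1) _ _ _ (by omega) (by omega)
    · rw [aLoop_exit pixels (f1 + 1) i cl best longs hi, aLoop_exit pixels f2 i cl best longs hi]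

theorem aLoop_succ (pixels : List Int) (fuel pixel : Nat) (cl best : Int)
    (longs : List (Int × Int)) (h : pixel < pixels.length - 1) :
    aLoop pixels (fuel + 1) pixel cl best longs =
      aLoop pixels fuel (pixel + 1) (aStep pixels pixel cl best longs).1
        (aStep pixels pixel cl best longs).2.1 (aStep pixels pixel cl best longs).2.2 := by
  simp only [aLoop]
  rw [if_pos h]

-- the scan from index i first consumes exactly the maximal run ending at bRunEnd pixels _ i
theorem aLoop_step (pixels : List Int) :
    ∀ fuel i (cl best : Int) (longs : List (Int × Int)), pixels.length - i ≤ fuel →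
      i < pixels.length - 1 →
      aLoop pixels fuel i cl best longs =
        (let j := bRunEnd pixels pixels.length i
         let cl' := cl + ((j - i : Nat) : Int)
         let best' := if cl' > best then cl' else best
         let longs' := if cl' > 100 then longs ++ [(pvGetI pixels j - cl' + 1, pvGetI pixels j)] else longs
         if j = pixels.length - 1 then (best', longs')
         else aLoop pixels fuel (j + 1) 1 best' longs') := by
  intro fuel
  induction fuel with
  | zero => intro i cl best longs hf h; omega
  | succ fuel ih =>
    intro i cl best longs hf h
    rw [aLoop_succ pixels fuel i cl best longs h]
    simp only [aStep]
    by_cases hd : pvGetI pixels (i + 1) - pvGetI pixels i = 1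
    · have hlt : i + 1 < pixels.length := by omega
      have hb : bRunEnd pixels pixels.length i = bRunEnd pixels pixels.length (i + 1) :=
        bRunEnd_cont pixels pixels.length i ⟨hlt, hd⟩ (by omega)
      have hj1 : i + 1 ≤ bRunEnd pixels pixels.length (i + 1) := bRunEnd_ge pixels _ _
      simp only [hd, if_true, and_true]
      by_cases hpen : i + 1 = pixels.length - 1
      · have hj : bRunEnd pixels pixels.length (i + 1) = i + 1 :=
          bRunEnd_stop pixels _ _ (fun hc => absurd hc.1 (by omega))
        have hji : bRunEnd pixels pixels.length i = i + 1 := by rw [hb, hj]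
        have hone : ((i + 1 - i : Nat) : Int) = 1 := by omega
        simp only [hji, if_pos hpen, hone]
        rw [aLoop_exit pixels fuel (i + 1) _ _ _ (by omega)]
      · have hstep : i + 1 < pixels.length - 1 := by omega
        simp only [if_neg hpen]
        rw [ih (i + 1) (cl + 1) best longs (by omega) hstep]
        simp only [← hb]
        have hc : (cl + 1) + ((bRunEnd pixels pixels.length i - (i + 1) : Nat) : Int)
            = cl + ((bRunEnd pixels pixels.length i - i : Nat) : Int) := by
          have := hb ▸ hj1; omega
        rw [hc]
        by_cases hjl : bRunEnd pixels pixels.length i = pixels.length - 1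
        · rw [if_pos hjl, if_pos hjl]
        · rw [if_neg hjl, if_neg hjl]
          exact aLoop_fuel pixels fuel (fuel + 1) _ _ _ _ (by have := hb ▸ hj1; omega)
            (by have := hb ▸ hj1; omega)
    · have hb : bRunEnd pixels pixels.length i = i :=
        bRunEnd_stop pixels _ _ (fun hc => hd hc.2)
      have hpen2 : ¬ (i + 1 = pixels.length - 1 ∧ pvGetI pixels (i + 1) - pvGetI pixels i = 1) :=
        fun hc => hd hc.2
      simp only [if_neg hd, if_neg hpen2, hb, Nat.sub_self, Nat.cast_zero, add_zero]
      rw [if_neg (show ¬ i = pixels.length - 1 by omega)]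
      exact aLoop_fuel pixels fuel (fuel + 1) _ _ _ _ (by omega) (by omega)

-- A's scan of one line computes B's max/filter over the run list
theorem aLoop_runs (pixels : List Int) :
    ∀ fuel i (best : Int) (longs : List (Int × Int)), pixels.length - i ≤ fuel → 1 ≤ best →
      aLoop pixels fuel i 1 best longs =
        (((bRuns pixels fuel i).map Prod.snd).foldl max best,
         longs ++ ((bRuns pixels fuel i).filter (fun r => r.2 > 100)).map
           (fun r => (r.1 - r.2 + 1, r.1))) := by
  intro fuel
  induction fuel with
  | zero =>
    intro i best longs hf hb1
    simp [aLoop, bRuns]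
  | succ fuel ih =>
    intro i best longs hf hb1
    by_cases hlast : i < pixels.length - 1
    · rw [aLoop_step pixels (fuel + 1) i 1 best longs hf hlast]
      have hij : i ≤ bRunEnd pixels pixels.length i := bRunEnd_ge pixels _ _
      have hjlt : bRunEnd pixels pixels.length i < pixels.length :=
        bRunEnd_lt pixels _ _ (by omega)
      simp only [bRuns]
      rw [if_pos (show i < pixels.length by omega)]
      have hmax : (if 1 + ((bRunEnd pixels pixels.length i - i : Nat) : Int) > best
            then 1 + ((bRunEnd pixels pixels.length i - i : Nat) : Int) else best)
          = max best (1 + ((bRunEnd pixels pixels.length i - i : Nat) : Int)) := by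
        rw [max_def]; split_ifs <;> omega
      have hlen : ((bRunEnd pixels pixels.length i - i + 1 : Nat) : Int)
          = 1 + ((bRunEnd pixels pixels.length i - i : Nat) : Int) := by omega
      by_cases hj : bRunEnd pixels pixels.length i = pixels.length - 1
      · rw [if_pos hj]
        rw [bRuns_exit pixels fuel (bRunEnd pixels pixels.length i + 1) (by omega)]
        simp only [List.map_cons, List.map_nil, List.foldl_cons, List.foldl_nil,
          List.filter_cons, List.filter_nil, hlen, hmax]
        by_cases h100 : 1 + ((bRunEnd pixels pixels.length i - i : Nat) : Int) > 100
        · simp [h100]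
        · simp [h100]
      · rw [if_neg hj]
        rw [aLoop_fuel pixels (fuel + 1) fuel _ _ _ _ (by omega) (by omega)]
        rw [ih (bRunEnd pixels pixels.length i + 1) _ _ (by omega) (by split_ifs <;> omega)]
        simp only [List.map_cons, List.foldl_cons, List.filter_cons, hlen, hmax]
        by_cases h100 : 1 + ((bRunEnd pixels pixels.length i - i : Nat) : Int) > 100
        · simp [h100, List.append_assoc]
        · simp [h100]
    · -- i ≥ length - 1: the scan is already finished; at most one singleton run remains
      rw [aLoop_exit pixels (fuel + 1) i 1 best longs hlast]
      by_cases hi : i < pixels.length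
      · have hb : bRunEnd pixels pixels.length i = i :=
          bRunEnd_stop pixels _ _ (fun hc => absurd hc.1 (by omega))
        simp only [bRuns]
        rw [if_pos hi, hb]
        rw [bRuns_exit pixels fuel (i + 1) (by omega)]
        simp [max_def]
        omega
      · rw [bRuns_exit pixels (fuel + 1) i hi]
        simp

-- ===== VERDICT (by name: the statement is the Claim_ definition above) =====
theorem longestContinuousLengthPerLine_spec : Claim_equal_longestContinuousLengthPerLine := by
  intro d _ hpre
  unfold Spec_longestContinuousLengthPerLine longestContinuousLengthPerLine
    longestContinuousLengthPerLine_alt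
  apply PySem.List.foldl_congr_mem'
  intro p hp acc
  have hlk : pvLookup d p.1 = p.2 := pvLookup_eq d p hpre hp
  have hrun := aLoop_runs p.2 p.2.length 0 1 [] (by omega) (by omega)
  simp only [hlk, hrun, List.nil_append]
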